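-- pv_equiv track=rewrite | github.com/skyjiao/CodilityTest | triangle.py | solution
-- ===== SOURCE A (Python) =====
-- def solution(A):
--     # write your code in Python 2.7
--     N = len(A)
--     if N <= 2:
--         return -1
--     sorted_A = sorted(A)
--     for i in range(N - 2):
--         if sorted_A[i] + sorted_A[i + 1] > sorted_A[i + 2]:
--             return 1
--     return -1
-- ===== SOURCE B (Python) =====
-- def solution(A):
--     # Brute force over all index triples i<j<k, testing the triangle
--     # inequality directly on the unsorted array; no sort.
--     n = len(A)
--     for i in range(n):
--         for j in range(i + 1, n):
--             for k in range(j + 1, n):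
--                 x, y, z = A[i], A[j], A[k]
--                 if x + y > z and x + z > y and y + z > x:
--                     return 1
--     return -1
-- ===== Notes on version B (the rewrite author's own statement) =====
-- stated objective: alternative
-- what changed: Replaced the sort-then-scan-consecutive-triples strategy by a direct brute-force test of the triangle inequality over all index triples of the unsorted array; no sort, at the cost of O(N^3) vs O(N log N).
import Mathlib
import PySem

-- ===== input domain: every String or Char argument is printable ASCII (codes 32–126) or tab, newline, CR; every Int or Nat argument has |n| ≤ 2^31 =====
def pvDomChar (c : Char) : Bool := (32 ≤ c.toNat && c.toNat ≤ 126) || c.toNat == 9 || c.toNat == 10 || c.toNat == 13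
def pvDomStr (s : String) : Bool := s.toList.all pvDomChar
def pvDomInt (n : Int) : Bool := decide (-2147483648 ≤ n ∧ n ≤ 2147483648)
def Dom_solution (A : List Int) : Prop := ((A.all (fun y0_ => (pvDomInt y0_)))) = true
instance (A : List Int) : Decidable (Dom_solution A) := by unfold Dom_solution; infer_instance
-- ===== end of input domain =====

-- B replaces A's sort-then-scan-consecutive-triples strategy by a direct
-- brute-force triangle-inequality test over all index triples (alternative
-- algorithm, no sort; O(N^3) instead of O(N log N)).

-- ===== PORT A =====
-- the loop `for i in range(N-2): if sorted_A[i] + sorted_A[i+1] > sorted_A[i+2] ...`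
-- as the obvious recursion over consecutive triples of the sorted list
def consecScan : List Int → Int
  | a :: b :: c :: t => if a + b > c then 1 else consecScan (b :: c :: t)
  | _ => -1

def solution (A : List Int) : Int :=
  if A.length ≤ 2 then -1
  else consecScan (PySem.List.sorted A (fun x => x) false)

-- ===== PORT B =====
def tri (x y z : Int) : Bool := decide (x + y > z) && decide (x + z > y) && decide (y + z > x)

-- inner two loops: `for j …: for k …:` over the suffix after position i
def pairScan (x : Int) : List Int → Bool
  | [] => false
  | y :: rest => rest.any (fun z => tri x y z) || pairScan x rest

-- outer loop `for i in range(n)`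
def tripleScan : List Int → Bool
  | [] => false
  | x :: rest => pairScan x rest || tripleScan rest

def solution_alt (A : List Int) : Int :=
  if tripleScan A then 1 else -1

-- ===== PRECONDITION & SPEC =====
def Spec_solution (A : List Int) (out : Int) : Prop := out = solution_alt A
instance (A : List Int) (out : Int) : Decidable (Spec_solution A out) := by unfold Spec_solution; infer_instance

-- ===== CLAIM (what is proved, stated in full; the proofs are below) =====
def Claim_equal_solution : Prop := ∀ (A : List Int), Dom_solution A → Spec_solution A (solution A)

-- ===== LEMMAS AND PROOFS =====

theorem tri_iff (x y z : Int) : tri x y z = true ↔ x + y > z ∧ x + z > y ∧ y + z > x := by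
  simp [tri, and_assoc]

-- the triangle predicate only depends on the multiset {x,y,z}
theorem tri_perm (a b c x y z : Int) (h : List.Perm [a, b, c] [x, y, z])
    (ht : tri x y z = true) : tri a b c = true := by
  have hsum := h.sum_eq
  have ha : a ∈ ([x, y, z] : List Int) := h.subset (by simp)
  have hb : b ∈ ([x, y, z] : List Int) := h.subset (by simp)
  have hc : c ∈ ([x, y, z] : List Int) := h.subset (by simp)
  simp [tri_iff] at ht ⊢
  simp at hsum ha hb hc
  rcases ha with ha | ha | ha <;> rcases hb with hb | hb | hb <;>
    rcases hc with hc | hc | hc <;> omega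

theorem pairScan_iff (x : Int) (L : List Int) :
    pairScan x L = true ↔ ∃ y z, [y, z].Sublist L ∧ tri x y z = true := by
  induction L with
  | nil => simp [pairScan]
  | cons y rest ih =>
    simp only [pairScan, Bool.or_eq_true, List.any_eq_true, ih]
    constructor
    · rintro (⟨z, hz, ht⟩ | ⟨y', z', hs, ht⟩)
      · exact ⟨y, z, List.cons_sublist_cons.2 (List.singleton_sublist.2 hz), ht⟩
      · exact ⟨y', z', hs.cons y, ht⟩
    · rintro ⟨y', z', hs, ht⟩
      rcases List.sublist_cons_iff.1 hs with h | ⟨r, heq, hr⟩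
      · exact Or.inr ⟨y', z', h, ht⟩
      · cases heq
        exact Or.inl ⟨z', List.singleton_sublist.1 hr, ht⟩

theorem tripleScan_iff (L : List Int) :
    tripleScan L = true ↔ ∃ x y z, [x, y, z].Sublist L ∧ tri x y z = true := by
  induction L with
  | nil => simp [tripleScan]
  | cons x rest ih =>
    simp only [tripleScan, Bool.or_eq_true, pairScan_iff, ih]
    constructor
    · rintro (⟨y, z, hs, ht⟩ | ⟨x', y', z', hs, ht⟩)
      · exact ⟨x, y, z, List.cons_sublist_cons.2 hs, ht⟩
      · exact ⟨x', y', z', hs.cons x, ht⟩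
    · rintro ⟨x', y', z', hs, ht⟩
      rcases List.sublist_cons_iff.1 hs with h | ⟨r, heq, hr⟩
      · exact Or.inr ⟨x', y', z', h, ht⟩
      · cases heq
        exact Or.inl ⟨y', z', hr, ht⟩

-- key step: in a sorted list headed by a, a pair y ≤ z further right with
-- a + y > z forces some consecutive triple to pass A's check
theorem consec_of_pair (S : List Int) : ∀ (a y z : Int),
    List.Pairwise (· ≤ ·) (a :: S) → [y, z].Sublist S → a + y > z →
    consecScan (a :: S) = 1 := by
  induction S with
  | nil => intro a y z _ hs _; simp at hs
  | cons b S' ih =>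
    intro a y z hpw hs hgt
    have hab : a ≤ b := (List.pairwise_cons.1 hpw).1 b (by simp)
    have hpw' : List.Pairwise (· ≤ ·) (b :: S') := (List.pairwise_cons.1 hpw).2
    rcases List.sublist_cons_iff.1 hs with h | ⟨r, heq, hr⟩
    · -- the pair lies in S'
      have h1 : consecScan (b :: S') = 1 := ih b y z hpw' h (by omega)
      rcases S' with _ | ⟨c, S''⟩
      · simp at h
      · simp only [consecScan]
        split
        · rfl
        · exact h1
    · -- y = b, z further right
      cases heq
      rcases S' with _ | ⟨c, S''⟩
      · simp at hr
      · have hbc : b ≤ c := (List.pairwise_cons.1 hpw').1 c (by simp)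
        rcases List.sublist_cons_iff.1 hr with h2 | ⟨r', heq', hr'⟩
        · -- z strictly beyond c
          have hz : z ∈ S'' := List.singleton_sublist.1 h2
          have h1 : consecScan (b :: c :: S'') = 1 :=
            ih b c z hpw' (List.cons_sublist_cons.2 (List.singleton_sublist.2 hz)) (by omega)
          simp only [consecScan]
          split
          · rfl
          · exact h1
        · -- z = c: the prefix triple (a, b, c) passes
          cases heq'
          simp only [consecScan]
          split
          · rfl
          · omega

theorem consec_of_sub (S : List Int) :
    List.Pairwise (· ≤ ·) S →
    (∃ x y z, [x, y, z].Sublist S ∧ tri x y z = true) → consecScan S = 1 := by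
  induction S with
  | nil => rintro _ ⟨x, y, z, hs, _⟩; simp at hs
  | cons a S' ih =>
    rintro hpw ⟨x, y, z, hs, ht⟩
    rcases List.sublist_cons_iff.1 hs with h | ⟨r, heq, hr⟩
    · have h1 : consecScan S' = 1 := ih (List.pairwise_cons.1 hpw).2 ⟨x, y, z, h, ht⟩
      rcases S' with _ | ⟨b, S''⟩
      · simp at h
      · rcases S'' with _ | ⟨c, S'''⟩
        · have := h.length_le; simp at this
        · simp only [consecScan]
          split
          · rfl
          · exact h1
    · injection heq with h1 h2
      subst h1; subst h2
      exact consec_of_pair S' x y z hpw hr ((tri_iff x y z).1 ht).1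

theorem sub_of_consec (S : List Int) :
    List.Pairwise (· ≤ ·) S → consecScan S = 1 →
    ∃ x y z, [x, y, z].Sublist S ∧ tri x y z = true := by
  induction S with
  | nil => intro _ h; simp [consecScan] at h
  | cons a S' ih =>
    intro hpw h
    rcases S' with _ | ⟨b, S''⟩
    · simp [consecScan] at h
    · rcases S'' with _ | ⟨c, S'''⟩
      · simp [consecScan] at h
      · have hab : a ≤ b := (List.pairwise_cons.1 hpw).1 b (by simp)
        have hpw' : List.Pairwise (· ≤ ·) (b :: c :: S''') := (List.pairwise_cons.1 hpw).2
        have hbc : b ≤ c := (List.pairwise_cons.1 hpw').1 c (by simp)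
        simp only [consecScan] at h
        by_cases habc : a + b > c
        · refine ⟨a, b, c, ?_, ?_⟩
          · exact (List.nil_sublist S''').cons₂ c |>.cons₂ b |>.cons₂ a
          · rw [tri_iff]; omega
        · rw [if_neg habc] at h
          obtain ⟨x, y, z, hs, ht⟩ := ih hpw' h
          exact ⟨x, y, z, hs.cons a, ht⟩

theorem consecScan_cases (S : List Int) : consecScan S = 1 ∨ consecScan S = -1 := by
  induction S with
  | nil => simp [consecScan]
  | cons a S' ih =>
    rcases S' with _ | ⟨b, S''⟩
    · simp [consecScan]
    · rcases S'' with _ | ⟨c, S'''⟩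
      · simp [consecScan]
      · simp only [consecScan]
        split
        · left; rfl
        · exact ih

-- transport a triangle sublist across a permutation of the list
theorem sub_perm_transport (L M : List Int) (hperm : List.Perm L M)
    (h : ∃ x y z, [x, y, z].Sublist L ∧ tri x y z = true) :
    ∃ x y z, [x, y, z].Sublist M ∧ tri x y z = true := by
  obtain ⟨x, y, z, hs, ht⟩ := h
  have hsp : List.Subperm [x, y, z] M := (hs.subperm).trans hperm.subperm
  obtain ⟨l, hl, hls⟩ := hsp
  have hlen : l.length = 3 := by simpa using hl.length_eq
  match l, hlen with
  | [a, b, c], _ =>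
    exact ⟨a, b, c, hls, tri_perm a b c x y z hl ht⟩

-- ===== VERDICT (by name: the statement is the Claim_ definition above) =====
theorem solution_spec : Claim_equal_solution := by
  intro A _
  unfold Spec_solution solution solution_alt
  set S := PySem.List.sorted A (fun x => x) false with hS
  have hperm : List.Perm S A := PySem.List.sorted_perm A (fun x => x) false
  have hpw : List.Pairwise (· ≤ ·) S := by
    have := PySem.List.sorted_pairwise (xs := A) (key := fun x : Int => x)
    simpa [hS] using this
  by_cases hlen : A.length ≤ 2
  · rw [if_pos hlen]
    by_cases ht : tripleScan A = true
    · obtain ⟨x, y, z, hs, _⟩ := (tripleScan_iff A).1 ht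
      have := hs.length_le
      simp at this
      omega
    · rw [Bool.not_eq_true] at ht
      rw [ht]
      simp
  · rw [if_neg hlen]
    by_cases ht : tripleScan A = true
    · rw [ht, if_pos rfl]
      apply consec_of_sub S hpw
      exact sub_perm_transport A S hperm.symm ((tripleScan_iff A).1 ht)
    · rw [Bool.not_eq_true] at ht
      rw [ht]
      rcases consecScan_cases S with h1 | h1
      · exfalso
        have := sub_perm_transport S A hperm (sub_of_consec S hpw h1)
        rw [(tripleScan_iff A).2 this] at ht
        simp at ht
      · simpa using h1
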